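-- pv_equiv track=rewrite | github.com/instadeepai/DebateLLM | debatellm/utils/eval.py | strip_special_chars
-- ===== SOURCE A (Python) =====
-- import string
--
-- def strip_special_chars(input_str: str) -> str:
--     "Remove special characters from string start/end"
--     if not input_str:
--         return input_str
--
--     start_index = 0
--     end_index = len(input_str) - 1
--
--     while (
--         start_index < len(input_str)
--         and input_str[start_index] not in string.ascii_letters + string.digits
--     ):
--         start_index += 1
--
--     while (
--         end_index >= 0
--         and input_str[end_index] not in string.ascii_letters + string.digits
--     ):
--         end_index -= 1
--
--     if start_index <= end_index:
--         return input_str[start_index : end_index + 1]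
--     else:
--         return ""
-- ===== SOURCE B (Python) =====
-- import re
--
-- _EDGE_SPECIALS = re.compile(r'^[^a-zA-Z0-9]+|[^a-zA-Z0-9]+$')
--
-- def strip_special_chars(input_str: str) -> str:
--     "Remove special characters from string start/end"
--     return _EDGE_SPECIALS.sub('', input_str)
-- ===== Notes on version B (the rewrite author's own statement) =====
-- stated objective: idiomatic
-- what changed: Replaces the two hand-written index-walking while loops and the conditional slice with a single anchored regular-expression substitution that deletes the maximal non-alphanumeric prefix and suffix.
import Mathlib
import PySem

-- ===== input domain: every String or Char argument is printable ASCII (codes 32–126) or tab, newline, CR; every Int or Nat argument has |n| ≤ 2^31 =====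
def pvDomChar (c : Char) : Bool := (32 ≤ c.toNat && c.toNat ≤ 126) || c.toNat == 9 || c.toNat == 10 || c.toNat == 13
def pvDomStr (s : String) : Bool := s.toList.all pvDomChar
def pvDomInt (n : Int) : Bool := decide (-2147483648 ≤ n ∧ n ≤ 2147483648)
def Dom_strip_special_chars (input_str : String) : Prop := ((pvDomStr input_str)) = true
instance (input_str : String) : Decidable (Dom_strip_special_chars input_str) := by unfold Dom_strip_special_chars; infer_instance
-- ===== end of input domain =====

-- B replaces A's two index-walking while loops and conditional slice by a single anchored
-- regex substitution deleting the maximal non-alphanumeric prefix and suffix (idiomatic).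

-- The character class string.ascii_letters + string.digits (A) = [a-zA-Z0-9] (B's regex class).
def pvAlnumChars : List Char :=
  "abcdefghijklmnopqrstuvwxyzABCDEFGHIJKLMNOPQRSTUVWXYZ0123456789".toList

-- c not in string.ascii_letters + string.digits  /  matches [^a-zA-Z0-9]
def pvSpecial (c : Char) : Bool := !(pvAlnumChars.contains c)

-- ===== PORT A =====
-- first while loop: advance start_index over special chars
def sscStart (l : List Char) (i : Nat) : Nat :=
  if h : i < l.length ∧ pvSpecial (l.getD i ' ') = true then sscStart l (i + 1) else i
termination_by l.length - i
decreasing_by omega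

-- second while loop: retreat end_index over special chars
def sscEnd (l : List Char) (e : Int) : Int :=
  if h : 0 ≤ e ∧ pvSpecial (l.getD e.toNat ' ') = true then sscEnd l (e - 1) else e
termination_by (e + 1).toNat
decreasing_by omega

def strip_special_chars (input_str : String) : String :=
  let l := input_str.toList
  if l.isEmpty then input_str
  else
    let startIndex := sscStart l 0
    let endIndex := sscEnd l ((l.length : Int) - 1)
    if (startIndex : Int) ≤ endIndex then
      String.ofList (PySem.List.slice l (some (startIndex : Int)) (some (endIndex + 1)))
    else ""

-- ===== PORT B =====
-- re.sub(r'^[^a-zA-Z0-9]+|[^a-zA-Z0-9]+$', '', s): the anchored substitution removes the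
-- maximal run of class chars at each end; ported as dropWhile at the front and (via reverse)
-- at the back — exact for this pattern.
def strip_special_chars_alt (input_str : String) : String :=
  String.ofList
    ((((input_str.toList.dropWhile pvSpecial).reverse.dropWhile pvSpecial)).reverse)

-- ===== PRECONDITION & SPEC =====
def Spec_strip_special_chars (input_str : String) (out : String) : Prop := out = strip_special_chars_alt input_str
instance (input_str : String) (out : String) : Decidable (Spec_strip_special_chars input_str out) := by unfold Spec_strip_special_chars; infer_instance

-- ===== CLAIM (what is proved, stated in full; the proofs are below) =====
def Claim_equal_strip_special_chars : Prop := ∀ (input_str : String), Dom_strip_special_chars input_str → Spec_strip_special_chars input_str (strip_special_chars input_str)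

-- ===== LEMMAS AND PROOFS =====

lemma sscStart_eq (l : List Char) (i : Nat) (h : i ≤ l.length) :
    sscStart l i = i + ((l.drop i).takeWhile pvSpecial).length := by
  fun_induction sscStart l i with
  | case1 i hc ih =>
    have hlt : i < l.length := hc.1
    have hg : l.getD i ' ' = l[i] := List.getD_eq_getElem l ' ' hlt
    have hp : pvSpecial l[i] = true := by rw [← hg]; exact hc.2
    rw [List.drop_eq_getElem_cons hlt, List.takeWhile_cons_of_pos hp]
    rw [ih (by omega)]
    simp; omega
  | case2 i hc =>
    by_cases hlt : i < l.length
    · have hg : l.getD i ' ' = l[i] := List.getD_eq_getElem l ' ' hlt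
      have hp : pvSpecial l[i] = false := by
        rcases Bool.eq_false_or_eq_true (pvSpecial l[i]) with h' | h'
        · exact absurd ⟨hlt, by rw [hg]; exact h'⟩ hc
        · exact h'
      rw [List.drop_eq_getElem_cons hlt, List.takeWhile_cons_of_neg (by simp [hp])]
      simp
    · have : i = l.length := by omega
      subst this
      simp

lemma sscEnd_eq (l : List Char) (e : Int) (h : e < (l.length : Int)) (h2 : -1 ≤ e) :
    sscEnd l e = e - (((l.take (e + 1).toNat).reverse.takeWhile pvSpecial).length : Int) := by
  fun_induction sscEnd l e with
  | case1 e hc ih =>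
    have he0 : 0 ≤ e := hc.1
    have hlt : e.toNat < l.length := by omega
    have hg : l.getD e.toNat ' ' = l[e.toNat] := List.getD_eq_getElem l ' ' hlt
    have hp : pvSpecial l[e.toNat] = true := by rw [← hg]; exact hc.2
    have hnat : (e + 1).toNat = e.toNat + 1 := by omega
    rw [hnat, List.take_add_one, List.getElem?_eq_getElem hlt]
    simp only [Option.toList_some, List.reverse_append, List.reverse_cons, List.reverse_nil,
      List.nil_append, List.singleton_append, List.takeWhile_cons_of_pos hp]
    rw [ih (by omega) (by omega)]
    have he1 : ((e - 1) + 1).toNat = e.toNat := by omega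
    rw [he1]
    simp; omega
  | case2 e hc =>
    by_cases he0 : 0 ≤ e
    · have hlt : e.toNat < l.length := by omega
      have hg : l.getD e.toNat ' ' = l[e.toNat] := List.getD_eq_getElem l ' ' hlt
      have hp : pvSpecial l[e.toNat] = false := by
        rcases Bool.eq_false_or_eq_true (pvSpecial l[e.toNat]) with h' | h'
        · exact absurd ⟨he0, by rw [hg]; exact h'⟩ hc
        · exact h'
      have hnat : (e + 1).toNat = e.toNat + 1 := by omega
      have hp' : ¬ pvSpecial l[e.toNat] = true := by simp [hp]
      rw [hnat, List.take_add_one, List.getElem?_eq_getElem hlt]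
      simp only [Option.toList_some, List.reverse_append, List.reverse_cons, List.reverse_nil,
        List.nil_append, List.singleton_append, List.takeWhile_cons_of_neg hp']
      simp
    · have he1 : e = -1 := by omega
      subst he1
      simp

-- ===== VERDICT (by name: the statement is the Claim_ definition above) =====
theorem strip_special_chars_spec : Claim_equal_strip_special_chars := by
  intro s _
  show strip_special_chars s = strip_special_chars_alt s
  unfold strip_special_chars strip_special_chars_alt
  by_cases hl : s.toList.isEmpty
  · have h0 : s.toList = [] := List.isEmpty_iff.mp hl
    simp only [h0, List.dropWhile_nil, List.reverse_nil, List.isEmpty_nil, if_true]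
    conv_lhs => rw [← String.ofList_toList (s := s), h0]
  · simp only [hl, Bool.false_eq_true, if_false]
    set l := s.toList with hldef
    have hlne : l ≠ [] := fun h => hl (List.isEmpty_iff.mpr h)
    set t := l.takeWhile pvSpecial with htdef
    set d := l.dropWhile pvSpecial with hddef
    have htd : t ++ d = l := List.takeWhile_append_dropWhile
    have hst : sscStart l 0 = t.length := by
      rw [sscStart_eq l 0 (by omega)]; simp [htdef]
    have hkdef : sscEnd l ((l.length : Int) - 1) =
        ((l.length : Int) - 1) - ((l.reverse.takeWhile pvSpecial).length : Int) := by
      rw [sscEnd_eq l _ (by omega) (by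
        have : 0 < l.length := List.length_pos_of_ne_nil hlne
        omega)]
      have hlen1 : (((l.length : Int) - 1) + 1).toNat = l.length := by omega
      rw [hlen1, List.take_length]
    by_cases hd : d = []
    · -- all characters special: A takes the else-branch and returns ""
      have hteq : t = l := by rw [← htd, hd, List.append_nil]
      have hall : ∀ x ∈ l, pvSpecial x = true := by
        intro x hx
        have hx2 : x ∈ t := by rw [hteq]; exact hx
        exact List.mem_takeWhile_imp (p := pvSpecial) (l := l) hx2
      have hrev : l.reverse.takeWhile pvSpecial = l.reverse :=
        List.takeWhile_eq_self_iff.mpr (fun x hx => hall x (List.mem_reverse.mp hx))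
      have hlen : 0 < l.length := List.length_pos_of_ne_nil hlne
      have hcond : ¬ ((sscStart l 0 : Int) ≤ sscEnd l ((l.length : Int) - 1)) := by
        rw [hst, hkdef, hrev, hteq]
        simp
        omega
      simp only [hcond, if_false, hd, List.dropWhile_nil, List.reverse_nil]
    · -- some alphanumeric character exists
      have hhead : pvSpecial (d.head hd) = false := List.head_dropWhile_not pvSpecial hd
      have hne : d.reverse.takeWhile pvSpecial ≠ d.reverse := by
        intro hEq
        have hcontra : pvSpecial (d.head hd) = true :=
          List.mem_takeWhile_imp (by rw [hEq]; exact List.mem_reverse.mpr (List.head_mem hd))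
        rw [hhead] at hcontra
        exact absurd hcontra (by simp)
      set k := (d.reverse.takeWhile pvSpecial).length with hk
      have hklt : k < d.length := by
        have hle : k ≤ d.reverse.length := (List.takeWhile_prefix pvSpecial).length_le
        rw [List.length_reverse] at hle
        rcases lt_or_eq_of_le hle with h' | h'
        · exact h'
        · exact absurd ((List.takeWhile_prefix pvSpecial).eq_of_length
            (by rw [List.length_reverse, ← hk, h'])) hne
      have hrevl : l.reverse = d.reverse ++ t.reverse := by
        rw [← htd, List.reverse_append]
      have hkeq : l.reverse.takeWhile pvSpecial = d.reverse.takeWhile pvSpecial := by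
        rw [hrevl, List.takeWhile_append, if_neg]
        intro h'
        exact hne ((List.takeWhile_prefix pvSpecial).eq_of_length h')
      have hlenl : l.length = t.length + d.length := by
        rw [← htd, List.length_append]
      have hen : sscEnd l ((l.length : Int) - 1) = ((l.length : Int) - 1) - (k : Int) := by
        rw [hkdef, hkeq]
      have hcond : (sscStart l 0 : Int) ≤ sscEnd l ((l.length : Int) - 1) := by
        rw [hst, hen]; omega
      simp only [hcond, if_true]
      congr 1
      rw [hst, hen]
      have hb : ((l.length : Int) - 1 - (k : Int)) + 1 = ((t.length + (d.length - k) : Nat) : Int) := by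
        omega
      rw [hb, PySem.List.slice_natCast]
      have hdropl : List.drop t.length l = d := by
        rw [← htd]; exact List.drop_left
      rw [hdropl]
      have h3 : t.length + (d.length - k) - t.length = d.length - k := by omega
      rw [h3]
      -- B side: dropWhile on d.reverse drops exactly its takeWhile prefix
      have hB : d.reverse.dropWhile pvSpecial = d.reverse.drop k := by
        conv_rhs => rw [← List.takeWhile_append_dropWhile (p := pvSpecial) (l := d.reverse)]
        rw [List.drop_left' rfl]
      rw [hB, List.drop_reverse, List.reverse_reverse]
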